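-- pv_equiv track=rewrite | github.com/gabozako/AlgoQueen | suy2on/CodingTest/NEXON/3.py | getMinimumHealth
-- ===== SOURCE A (Python) =====
-- import bisect
-- import collections
--
-- def getMinimumHealth(initial_players, new_players, rank):
--     # Write your code here
--     initial_players.sort()
--     ranking = collections.deque()
--     for player in initial_players[-rank:]:
--         ranking.append(player)
--
--     answer = ranking[0]
--
--     for new_player in new_players:
--         idx = bisect.bisect_left(ranking, new_player)
--         if idx:
--             ranking.insert(idx, new_player)
--             ranking.popleft()
--
--         answer += ranking[0]
--
--     return answer
-- ===== SOURCE B (Python) =====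
-- def getMinimumHealth(initial_players, new_players, rank):
--     # Alternative: keep the kept players as an UNSORTED bag and track only the
--     # current minimum; on each beating player, drop one copy of the minimum,
--     # append the newcomer and rescan for the new minimum.  No bisect, no sorted
--     # order is maintained.  (Sorts initial_players in place, like the original.)
--     initial_players.sort()
--     bag = initial_players[-rank:]
--     cur = bag[0]
--     answer = cur
--     for p in new_players:
--         if p > cur:
--             bag.remove(cur)
--             bag.append(p)
--             cur = min(bag)
--         answer += cur
--     return answer
-- ===== Notes on version B (the rewrite author's own statement) =====
-- stated objective: alternative
-- what changed: A keeps the top-rank players as a sorted deque and does a bisect + positional insert + popleft for every new player; B keeps them as an unsorted bag with the current minimum tracked separately, so a new player not beating the minimum costs O(1) (no bisect over the deque) and a beating player costs one remove/append plus a min() rescan.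
import Mathlib
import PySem

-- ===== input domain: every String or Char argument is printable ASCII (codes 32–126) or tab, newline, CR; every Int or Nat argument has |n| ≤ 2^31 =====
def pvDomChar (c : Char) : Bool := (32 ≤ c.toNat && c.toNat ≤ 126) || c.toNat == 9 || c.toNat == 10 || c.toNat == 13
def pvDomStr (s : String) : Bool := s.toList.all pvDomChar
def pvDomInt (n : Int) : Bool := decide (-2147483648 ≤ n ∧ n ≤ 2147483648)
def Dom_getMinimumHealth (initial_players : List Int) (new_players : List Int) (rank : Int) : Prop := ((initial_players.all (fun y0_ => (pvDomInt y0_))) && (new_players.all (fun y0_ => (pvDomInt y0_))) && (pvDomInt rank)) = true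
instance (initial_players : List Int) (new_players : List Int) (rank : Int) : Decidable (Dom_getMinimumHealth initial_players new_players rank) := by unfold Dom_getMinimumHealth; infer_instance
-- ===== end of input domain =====

-- B replaces A's sorted deque + bisect/insert/popleft by an unsorted bag with the
-- current minimum tracked separately (objective: alternative; equivalence is about
-- the return value; both versions sort initial_players in place).

-- ===== PORT A =====
-- bisect.bisect_left ported by its contract on sorted lists (the deque is always
-- sorted here): index of the first element ≥ x; exact on every sorted list.
def pvBisectLeft (xs : List Int) (x : Int) : Nat :=
  match xs with
  | [] => 0
  | a :: t => if a < x then pvBisectLeft t x + 1 else 0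

-- one iteration of A's loop body over the state (ranking, answer)
def pvStepA (st : List Int × Int) (p : Int) : List Int × Int :=
  let idx := pvBisectLeft st.1 p
  let r := if idx ≠ 0 then (PySem.List.insert st.1 (idx : Int) p).tail else st.1
  (r, st.2 + r.headD 0)   -- ranking[0]; Pre_ keeps the deque nonempty

def getMinimumHealth (initial_players : List Int) (new_players : List Int) (rank : Int) : Int :=
  let s := PySem.List.sorted initial_players (fun x => x) false
  let ranking := PySem.List.slice s (some (-rank)) none
  -- answer = ranking[0]: IndexError on an empty slice is excluded by Pre_
  (new_players.foldl pvStepA (ranking, ranking.headD 0)).2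

-- ===== PORT B =====
-- one iteration of B's loop body over the state (bag, cur, answer)
def pvStepB (st : List Int × Int × Int) (p : Int) : List Int × Int × Int :=
  if st.2.1 < p then
    let bag := ((PySem.List.remove? st.1 st.2.1).getD []) ++ [p]  -- cur ∈ bag always, so remove? never fails
    let cur := (PySem.List.min? bag (fun x => x)).getD 0          -- bag nonempty, so min? never fails
    (bag, cur, st.2.2 + cur)
  else (st.1, st.2.1, st.2.2 + st.2.1)

def getMinimumHealth_alt (initial_players : List Int) (new_players : List Int) (rank : Int) : Int :=
  let s := PySem.List.sorted initial_players (fun x => x) false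
  let bag := PySem.List.slice s (some (-rank)) none
  let cur := bag.headD 0   -- bag[0]: IndexError on an empty slice is excluded by Pre_
  (new_players.foldl pvStepB (bag, cur, cur)).2.2

-- ===== PRECONDITION & SPEC =====
-- Pre_ excludes exactly the inputs where sorted(initial_players)[-rank:] is empty:
-- there both A and B raise IndexError on ranking[0] / bag[0].
def Pre_getMinimumHealth (initial_players : List Int) (new_players : List Int) (rank : Int) : Prop :=
  if 0 ≤ rank then initial_players ≠ [] else -rank < (initial_players.length : Int)
instance (initial_players : List Int) (new_players : List Int) (rank : Int) : Decidable (Pre_getMinimumHealth initial_players new_players rank) := by unfold Pre_getMinimumHealth; infer_instance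

def pvWitness_getMinimumHealth : List Int × List Int × Int := ([3, 1, 2], [2, 4], 2)

def Spec_getMinimumHealth (initial_players : List Int) (new_players : List Int) (rank : Int) (out : Int) : Prop := out = getMinimumHealth_alt initial_players new_players rank
instance (initial_players : List Int) (new_players : List Int) (rank : Int) (out : Int) : Decidable (Spec_getMinimumHealth initial_players new_players rank out) := by unfold Spec_getMinimumHealth; infer_instance

-- ===== CLAIM (what is proved, stated in full; the proofs are below) =====
def Claim_equal_getMinimumHealth : Prop := ∀ (initial_players : List Int) (new_players : List Int) (rank : Int), Dom_getMinimumHealth initial_players new_players rank → Pre_getMinimumHealth initial_players new_players rank → Spec_getMinimumHealth initial_players new_players rank (getMinimumHealth initial_players new_players rank)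

-- ===== LEMMAS AND PROOFS =====

lemma pvBisectLeft_le_length (xs : List Int) (x : Int) : pvBisectLeft xs x ≤ xs.length := by
  induction xs with
  | nil => simp [pvBisectLeft]
  | cons a t ih =>
    simp only [pvBisectLeft, List.length_cons]
    split <;> omega

-- inserting at the bisect position keeps the list sorted
lemma pvInsertIdx_eq (l : List Int) (n : Nat) (p : Int) (h : n ≤ l.length) :
    l.insertIdx n p = l.take n ++ p :: l.drop n := by
  induction l generalizing n with
  | nil =>
    cases n with
    | zero => simp
    | succ n => simp at h
  | cons a t ih =>
    cases n with
    | zero => simp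
    | succ n =>
      simp only [List.insertIdx_succ_cons, List.take_succ_cons, List.drop_succ_cons,
        List.cons_append]
      rw [ih n (by simpa using h)]

lemma pvInsertIdx_sorted (t : List Int) (p : Int) (h : t.Pairwise (· ≤ ·)) :
    (t.insertIdx (pvBisectLeft t p) p).Pairwise (· ≤ ·) := by
  induction t with
  | nil => simp [pvBisectLeft]
  | cons a t ih =>
    rw [List.pairwise_cons] at h
    by_cases hap : a < p
    · simp only [pvBisectLeft, if_pos hap, List.insertIdx_succ_cons, List.pairwise_cons]
      refine ⟨?_, ih h.2⟩
      intro b hb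
      rcases List.eq_or_mem_of_mem_insertIdx hb with hb | hb
      · omega
      · exact h.1 b hb
    · simp only [pvBisectLeft, if_neg hap, List.insertIdx_zero, List.pairwise_cons]
      refine ⟨?_, h⟩
      intro b hb
      rcases List.mem_cons.mp hb with hb | hb
      · omega
      · exact le_trans (by omega) (h.1 b hb)

-- the min of any permutation of a sorted nonempty list is its head
lemma pvMin?_perm_sorted (dq bag : List Int) (h0 : Int) (t : List Int)
    (hdq : dq = h0 :: t) (hs : dq.Pairwise (· ≤ ·)) (hp : dq.Perm bag) :
    PySem.List.min? bag (fun x => x) = some h0 := by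
  subst hdq
  have hbne : bag ≠ [] := by
    intro hb; subst hb; exact absurd hp.symm.length_eq (by simp)
  obtain ⟨m, hm⟩ : ∃ m, PySem.List.min? bag (fun x => x) = some m := by
    cases hmm : PySem.List.min? bag (fun x => x) with
    | none => exact absurd ((PySem.List.min?_eq_none_iff bag (fun x => x)).mp hmm) hbne
    | some m => exact ⟨m, rfl⟩
  have hmem : m ∈ bag := PySem.List.min?_mem hm
  have hmin : ∀ y ∈ bag, m ≤ y := by
    intro y hy; exact PySem.List.min?_isMin hm y hy
  have hm_in_dq : m ∈ h0 :: t := hp.mem_iff.mpr hmem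
  have h0_in_bag : h0 ∈ bag := hp.mem_iff.mp (by simp)
  have h1 : h0 ≤ m := by
    rcases List.mem_cons.mp hm_in_dq with heq | hmt
    · omega
    · exact (List.pairwise_cons.mp hs).1 m hmt
  have h2 : m ≤ h0 := hmin h0 h0_in_bag
  rw [hm]; exact congrArg some (le_antisymm h2 h1)

-- the single loop-step correspondence, iterated
lemma pvLoop (ps : List Int) (dq bag : List Int) (ans : Int)
    (hs : dq.Pairwise (· ≤ ·)) (hne : dq ≠ []) (hp : dq.Perm bag) :
    (ps.foldl pvStepA (dq, ans)).2 = (ps.foldl pvStepB (bag, dq.headD 0, ans)).2.2 := by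
  induction ps generalizing dq bag ans with
  | nil => rfl
  | cons p ps ih =>
    obtain ⟨h0, t, rfl⟩ : ∃ h0 t, dq = h0 :: t := by
      cases dq with
      | nil => exact absurd rfl hne
      | cons a b => exact ⟨a, b, rfl⟩
    simp only [List.foldl_cons]
    by_cases hcomp : h0 < p
    · -- replacement step
      have hbis : pvBisectLeft (h0 :: t) p = pvBisectLeft t p + 1 := by
        simp [pvBisectLeft, hcomp]
      have hle : pvBisectLeft t p + 1 ≤ (h0 :: t).length := by
        have := pvBisectLeft_le_length t p; simp; omega
      have hinsert :
          (PySem.List.insert (h0 :: t) ((pvBisectLeft (h0 :: t) p : Nat) : Int) p).tail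
            = t.insertIdx (pvBisectLeft t p) p := by
        rw [hbis, PySem.List.insert_natCast _ _ _ hle]
        rw [pvInsertIdx_eq t _ p (pvBisectLeft_le_length t p)]
        simp
      set dq' := t.insertIdx (pvBisectLeft t p) p with hdq'
      have hstepA : pvStepA (h0 :: t, ans) p = (dq', ans + dq'.headD 0) := by
        simp only [pvStepA]
        rw [if_pos (by rw [hbis]; omega)]
        rw [hinsert]
      have hperm' : dq'.Perm (p :: t) :=
        List.perm_insertIdx p t (pvBisectLeft_le_length t p)
      have hs' : dq'.Pairwise (· ≤ ·) :=
        pvInsertIdx_sorted t p (List.pairwise_cons.mp hs).2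
      have hne' : dq' ≠ [] := by
        intro hx
        have := hperm'.length_eq
        rw [hx] at this; simp at this
      -- B side
      have hmem : h0 ∈ bag := hp.mem_iff.mp (by simp)
      have hremove : PySem.List.remove? bag h0 = some (bag.erase h0) :=
        PySem.List.remove?_eq_some_erase bag h0 hmem
      have herase : (bag.erase h0).Perm t := by
        have := hp.erase h0
        rw [List.erase_cons_head] at this
        exact this.symm
      have hbag' : (bag.erase h0 ++ [p]).Perm dq' :=
        ((List.perm_append_singleton p _).trans (herase.cons p)).trans hperm'.symm
      obtain ⟨h1, t1, hdq1⟩ : ∃ h1 t1, dq' = h1 :: t1 := by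
        cases hdqc : dq' with
        | nil => exact absurd hdqc hne'
        | cons a b => exact ⟨a, b, rfl⟩
      have hminB : PySem.List.min? (bag.erase h0 ++ [p]) (fun x => x) = some h1 :=
        pvMin?_perm_sorted dq' _ h1 t1 hdq1 hs' hbag'.symm
      have hstepB : pvStepB (bag, h0, ans) p
          = (bag.erase h0 ++ [p], dq'.headD 0, ans + dq'.headD 0) := by
        simp only [pvStepB, if_pos hcomp, hremove, Option.getD_some]
        rw [hminB]
        simp [hdq1]
      rw [List.headD_cons, hstepA, hstepB]
      exact ih dq' (bag.erase h0 ++ [p]) (ans + dq'.headD 0) hs' hne' hbag'.symm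
    · -- no replacement
      have hbis : pvBisectLeft (h0 :: t) p = 0 := by simp [pvBisectLeft, hcomp]
      have hstepA : pvStepA (h0 :: t, ans) p = (h0 :: t, ans + h0) := by
        simp [pvStepA, hbis]
      have hstepB : pvStepB (bag, h0, ans) p = (bag, h0, ans + h0) := by
        simp [pvStepB, hcomp]
      rw [List.headD_cons, hstepA, hstepB]
      have := ih (h0 :: t) bag (ans + h0) hs hne hp
      rw [List.headD_cons] at this
      exact this

-- the initial slice is sorted
lemma pvSlice_sorted (l : List Int) (rank : Int) :
    (PySem.List.slice (PySem.List.sorted l (fun x => x) false) (some (-rank)) none).Pairwise (· ≤ ·) := by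
  rw [PySem.List.slice_some_none]
  exact List.Pairwise.sublist (List.drop_sublist _ _) (PySem.List.sorted_pairwise l (fun x => x))

-- under Pre_, the initial slice is nonempty
lemma pvSlice_ne_nil (l : List Int) (rank : Int)
    (hpre : if 0 ≤ rank then l ≠ [] else -rank < (l.length : Int)) :
    PySem.List.slice (PySem.List.sorted l (fun x => x) false) (some (-rank)) none ≠ [] := by
  rw [PySem.List.slice_some_none]
  have hlen : (PySem.List.sorted l (fun x => x) false).length = l.length :=
    PySem.List.length_sorted l _ _
  have hcl := PySem.List.clampIdx_le (PySem.List.sorted l (fun x => x) false).length (-rank)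
  intro hx
  rw [List.drop_eq_nil_iff] at hx
  by_cases hr : 0 ≤ rank
  · rw [if_pos hr] at hpre
    have hl0 : 0 < l.length := List.length_pos_of_ne_nil hpre
    rcases lt_or_eq_of_le hr with hr1 | hr2
    · -- rank > 0: clampIdx n (-rank) = n - rank.toNat < n
      obtain ⟨k, hk, rfl⟩ : ∃ k : Nat, 0 < k ∧ rank = (k : Int) :=
        ⟨rank.toNat, by omega, by omega⟩
      rw [show -((k : Int)) = -((k : Nat) : Int) from rfl,
        PySem.List.clampIdx_neg_natCast _ _ hk] at hx
      omega
    · -- rank = 0: slice is the whole list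
      subst hr2
      rw [show (-(0:Int)) = ((0:Nat) : Int) by norm_num, PySem.List.clampIdx_natCast] at hx
      omega
  · rw [if_neg hr] at hpre
    -- rank < 0: start = min (-rank) n with -rank < n
    obtain ⟨k, rfl⟩ : ∃ k : Nat, rank = -(k : Int) := ⟨(-rank).toNat, by omega⟩
    rw [show -(-((k:Nat):Int)) = ((k:Nat):Int) by ring, PySem.List.clampIdx_natCast] at hx
    omega

-- ===== VERDICT (by name: the statement is the Claim_ definition above) =====
theorem getMinimumHealth_spec : Claim_equal_getMinimumHealth := by
  intro initial_players new_players rank _ hpre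
  unfold Spec_getMinimumHealth getMinimumHealth getMinimumHealth_alt
  have hs := pvSlice_sorted initial_players rank
  have hne := pvSlice_ne_nil initial_players rank hpre
  exact pvLoop new_players _ _ _ hs hne (List.Perm.refl _)
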